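-- pv_equiv track=rewrite | github.com/Natanael-Heinrick/libras-hand-tracking | letter_classifier.py | detectar_j_por_dedos
-- ===== SOURCE A (Python) =====
-- def detectar_j_por_dedos(historico):
--
--     if len(historico) < 8:
--         return False
--
--     for i in range(len(historico)):
--
--         inicio = historico[i]
--
--         if inicio[4] == 1 and sum(inicio[:4]) <= 1:
--
--             for j in range(i + 3, len(historico)):  # 👈 distância mínima
--
--                 fim = historico[j]
--
--                 if fim[4] == 1 and fim[0] == 1:
--                     return True
--
--     return False
-- ===== SOURCE B (Python) =====
-- def detectar_j_por_dedos(historico):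
--     if len(historico) < 8:
--         return False
--     i0 = None
--     for i, f in enumerate(historico):
--         if f[4] == 1 and sum(f[:4]) <= 1:
--             i0 = i
--             break
--     if i0 is None:
--         return False
--     return any(f[4] == 1 and f[0] == 1 for f in historico[i0 + 3:])
-- ===== Notes on version B (the rewrite author's own statement) =====
-- stated objective: alternative
-- what changed: Instead of restarting the end-condition scan from every start-condition frame (nested loops, quadratic worst case), B finds only the EARLIEST start-condition index i0 and makes one scan for the end-condition over historico[i0+3:], which suffices because any index reachable from a later start index is also >= i0+3.
import Mathlib
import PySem

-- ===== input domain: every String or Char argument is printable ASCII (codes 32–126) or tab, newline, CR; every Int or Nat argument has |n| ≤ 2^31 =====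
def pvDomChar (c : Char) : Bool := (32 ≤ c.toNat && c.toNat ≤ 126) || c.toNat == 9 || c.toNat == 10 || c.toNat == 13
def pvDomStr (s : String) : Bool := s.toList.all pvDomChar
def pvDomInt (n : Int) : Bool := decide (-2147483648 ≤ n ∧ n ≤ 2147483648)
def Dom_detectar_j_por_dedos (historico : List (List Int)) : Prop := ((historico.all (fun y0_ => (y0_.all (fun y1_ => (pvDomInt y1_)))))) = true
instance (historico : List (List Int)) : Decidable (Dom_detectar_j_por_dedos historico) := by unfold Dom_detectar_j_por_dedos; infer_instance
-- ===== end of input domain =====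

-- B replaces A's nested scan (end-condition scan restarted from every start-condition frame) by
-- locating the earliest start-condition index once and scanning for the end-condition only from there.

-- ===== PORT A =====
def detectar_j_por_dedos (historico : List (List Int)) : Bool :=
  if historico.length < 8 then false
  else
    (PySem.List.pyRange 0 (historico.length : Int) 1).any (fun i =>
      let inicio := PySem.List.pyGetD historico i []
      if (PySem.List.pyGetD inicio 4 0 == 1)
          && decide ((PySem.List.slice inicio none (some 4)).sum ≤ 1) then
        (PySem.List.pyRange (i + 3) (historico.length : Int) 1).any (fun j =>
          let fim := PySem.List.pyGetD historico j []
          (PySem.List.pyGetD fim 4 0 == 1) && (PySem.List.pyGetD fim 0 0 == 1))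
      else false)

-- ===== PORT B =====
def pvStart (f : List Int) : Bool :=
  (PySem.List.pyGetD f 4 0 == 1) && decide ((PySem.List.slice f none (some 4)).sum ≤ 1)

def pvEnd (f : List Int) : Bool :=
  (PySem.List.pyGetD f 4 0 == 1) && (PySem.List.pyGetD f 0 0 == 1)

def detectar_j_por_dedos_alt (historico : List (List Int)) : Bool :=
  if historico.length < 8 then false
  else
    match historico.findIdx? pvStart with
    | none => false
    | some i0 => (PySem.List.slice historico (some ((i0 : Int) + 3)) none).any pvEnd

-- ===== PRECONDITION & SPEC =====
-- Pre_ excludes lists of 8 or more frames containing a frame shorter than 5 entries: indexing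
-- frame[4] can raise IndexError in Python there (A still returns True on some of them, when the
-- early `return True` fires before any short frame is touched — see cites).
def Pre_detectar_j_por_dedos (historico : List (List Int)) : Prop :=
  historico.length < 8 ∨ ∀ f ∈ historico, 5 ≤ f.length
instance (historico : List (List Int)) : Decidable (Pre_detectar_j_por_dedos historico) := by
  unfold Pre_detectar_j_por_dedos; infer_instance

def pvWitness_detectar_j_por_dedos : List (List Int) :=
  [[0,0,0,0,1],[0,0,0,0,0],[0,0,0,0,0],[1,0,0,0,1],[0,0,0,0,0],[0,0,0,0,0],[0,0,0,0,0],[0,0,0,0,0]]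

def Spec_detectar_j_por_dedos (historico : List (List Int)) (out : Bool) : Prop := out = detectar_j_por_dedos_alt historico
instance (historico : List (List Int)) (out : Bool) : Decidable (Spec_detectar_j_por_dedos historico out) := by unfold Spec_detectar_j_por_dedos; infer_instance

-- ===== CLAIM (what is proved, stated in full; the proofs are below) =====
def Claim_equal_detectar_j_por_dedos : Prop := ∀ (historico : List (List Int)), Dom_detectar_j_por_dedos historico → Pre_detectar_j_por_dedos historico → Spec_detectar_j_por_dedos historico (detectar_j_por_dedos historico)

-- ===== LEMMAS AND PROOFS =====

lemma pv_any_pyRange {p : Int → Bool} {a b : Int} :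
    (PySem.List.pyRange a b 1).any p = true ↔ ∃ x : Int, a ≤ x ∧ x < b ∧ p x = true := by
  simp only [List.any_eq_true, PySem.List.mem_pyRange_one]
  constructor
  · rintro ⟨x, ⟨h1, h2⟩, h3⟩; exact ⟨x, h1, h2, h3⟩
  · rintro ⟨x, h1, h2, h3⟩; exact ⟨x, ⟨h1, h2⟩, h3⟩

lemma pv_any_drop {p : List Int → Bool} {h : List (List Int)} {k : ℕ} :
    (List.drop k h).any p = true ↔ ∃ j : ℕ, k + 3 ≤ j + 3 ∧ ∃ hj : j < h.length, p (h[j]'hj) = true := by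
  rw [List.any_eq_true]
  constructor
  · rintro ⟨x, hx, hpx⟩
    obtain ⟨i, hi, rfl⟩ := List.mem_iff_getElem.mp hx
    have hlen : k + i < h.length := by
      have := hi; rw [List.length_drop] at this; omega
    refine ⟨k + i, by omega, hlen, ?_⟩
    rw [List.getElem_drop] at hpx
    exact hpx
  · rintro ⟨j, hkj, hj, hpj⟩
    have hlt : j - k < (List.drop k h).length := by rw [List.length_drop]; omega
    refine ⟨(List.drop k h)[j - k]'hlt, List.getElem_mem _, ?_⟩
    rw [List.getElem_drop]
    have hkj' : k + (j - k) = j := by omega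
    simp only [hkj']
    exact hpj

lemma pv_A_iff {h : List (List Int)} :
    ((PySem.List.pyRange 0 (h.length : Int) 1).any (fun i =>
        if pvStart (PySem.List.pyGetD h i []) then
          (PySem.List.pyRange (i + 3) (h.length : Int) 1).any (fun j => pvEnd (PySem.List.pyGetD h j []))
        else false)) = true
    ↔ ∃ i : ℕ, ∃ hi : i < h.length, pvStart (h[i]'hi) = true ∧
        ∃ j : ℕ, i + 3 ≤ j ∧ ∃ hj : j < h.length, pvEnd (h[j]'hj) = true := by
  rw [pv_any_pyRange]
  constructor
  · rintro ⟨x, hx0, hxn, hfx⟩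
    have hin : x.toNat < h.length := by omega
    rw [PySem.List.pyGetD_eq_getElem h [] hx0 hxn] at hfx
    split_ifs at hfx with hc
    · rw [pv_any_pyRange] at hfx
      obtain ⟨y, hy1, hy2, hpy⟩ := hfx
      have hy0 : (0 : Int) ≤ y := by omega
      have hjn : y.toNat < h.length := by omega
      rw [PySem.List.pyGetD_eq_getElem h [] hy0 hy2] at hpy
      exact ⟨x.toNat, hin, hc, y.toNat, by omega, hjn, hpy⟩
  · rintro ⟨i, hi, hs, j, hij, hj, he⟩
    refine ⟨(i : Int), by omega, by omega, ?_⟩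
    rw [PySem.List.pyGetD_eq_getElem h [] (by omega) (by omega)]
    simp only [Int.toNat_natCast]
    rw [if_pos hs, pv_any_pyRange]
    refine ⟨(j : Int), by omega, by omega, ?_⟩
    rw [PySem.List.pyGetD_eq_getElem h [] (by omega) (by omega)]
    simp only [Int.toNat_natCast]
    exact he

lemma pv_bool_ext {a b : Bool} (hab : a = true ↔ b = true) : a = b := by
  cases a <;> cases b <;> simp_all

-- ===== VERDICT (by name: the statement is the Claim_ definition above) =====
theorem detectar_j_por_dedos_spec : Claim_equal_detectar_j_por_dedos := by
  intro h _hd _hpre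
  unfold Spec_detectar_j_por_dedos detectar_j_por_dedos detectar_j_por_dedos_alt
  by_cases hlen : h.length < 8
  · rw [if_pos hlen, if_pos hlen]
  · rw [if_neg hlen, if_neg hlen]
    have hfun : (fun i : Int =>
        let inicio := PySem.List.pyGetD h i []
        if (PySem.List.pyGetD inicio 4 0 == 1)
            && decide ((PySem.List.slice inicio none (some 4)).sum ≤ 1) then
          (PySem.List.pyRange (i + 3) (h.length : Int) 1).any (fun j =>
            let fim := PySem.List.pyGetD h j []
            (PySem.List.pyGetD fim 4 0 == 1) && (PySem.List.pyGetD fim 0 0 == 1))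
        else false)
      = (fun i : Int =>
          if pvStart (PySem.List.pyGetD h i []) then
            (PySem.List.pyRange (i + 3) (h.length : Int) 1).any (fun j => pvEnd (PySem.List.pyGetD h j []))
          else false) := rfl
    rw [hfun]
    split
    next e =>
      have hnone := List.findIdx?_eq_none_iff.mp e
      apply List.any_eq_false.mpr
      intro x hx
      rw [PySem.List.mem_pyRange_one] at hx
      rw [PySem.List.pyGetD_eq_getElem h [] hx.1 hx.2]
      have hfalse : pvStart (h[x.toNat]'(by omega)) = false :=
        hnone _ (List.getElem_mem _)
      simp [hfalse]
    next i0 e =>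
      obtain ⟨hi0lt, hfind⟩ := List.findIdx?_eq_some_iff_findIdx_eq.mp e
      subst hfind
      have hstart : pvStart (h[List.findIdx pvStart h]'hi0lt) = true :=
        List.findIdx_getElem
      have hmin : ∀ k (hk : k < h.length), k < List.findIdx pvStart h →
          pvStart (h[k]'hk) = false := by
        intro k hk hki
        exact List.not_of_lt_findIdx hki
      have hB : PySem.List.slice h (some ((List.findIdx pvStart h : Int) + 3)) none
          = List.drop (List.findIdx pvStart h + 3) h := by
        have hc : ((List.findIdx pvStart h : Int) + 3)
            = ((List.findIdx pvStart h + 3 : ℕ) : Int) := by push_cast; ring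
        rw [hc, PySem.List.slice_from_natCast]
      rw [hB]
      apply pv_bool_ext
      rw [pv_A_iff, pv_any_drop]
      constructor
      · rintro ⟨i, hi, hs, j, hij, hj, he⟩
        have hi0le : List.findIdx pvStart h ≤ i := by
          by_contra hlt
          have hf := hmin i hi (by omega)
          rw [hf] at hs
          exact Bool.false_ne_true hs
        exact ⟨j, by omega, hj, he⟩
      · rintro ⟨j, hij, hj, he⟩
        exact ⟨List.findIdx pvStart h, hi0lt, hstart, j, by omega, hj, he⟩
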